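-- pv_equiv track=rewrite | github.com/TheoDlmz/DBCOMSOC | winners/pw.py | aggregate_veto
-- ===== SOURCE A (Python) =====
-- def aggregate_veto(leaves_list,m):
--     dico_leaves = dict()
--     tab_leaves = []
--     count_leaves = []
--     i = 0
--     for leaves_i in leaves_list:
--         if str(leaves_i) in dico_leaves.keys():
--             count_leaves[dico_leaves[str(leaves_i)]] += 1
--         else:
--             count_leaves.append(1)
--             tab_leaves.append(leaves_i)
--             dico_leaves[str(leaves_i)] = i
--             i+=1
--     return tab_leaves,count_leaves
-- ===== SOURCE B (Python) =====
-- def aggregate_veto(leaves_list, m):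
--     # Pass 1: full frequency table keyed by str(leaf).
--     counts = {}
--     for leaves_i in leaves_list:
--         k = str(leaves_i)
--         counts[k] = counts.get(k, 0) + 1
--     # Pass 2: ordered dedup, emitting the precomputed count at each first appearance.
--     tab_leaves = []
--     count_leaves = []
--     seen = set()
--     for leaves_i in leaves_list:
--         k = str(leaves_i)
--         if k not in seen:
--             seen.add(k)
--             tab_leaves.append(leaves_i)
--             count_leaves.append(counts[k])
--     return tab_leaves, count_leaves
-- ===== Notes on version B (the rewrite author's own statement) =====
-- stated objective: alternative
-- what changed: A makes one pass keeping a key->position dict and incrementing count_leaves at the stored index; B makes two separate passes: first a full frequency table keyed by str(leaf), then an ordered-dedup pass with a seen set that emits each first-seen leaf together with its precomputed total count.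
import Mathlib
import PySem

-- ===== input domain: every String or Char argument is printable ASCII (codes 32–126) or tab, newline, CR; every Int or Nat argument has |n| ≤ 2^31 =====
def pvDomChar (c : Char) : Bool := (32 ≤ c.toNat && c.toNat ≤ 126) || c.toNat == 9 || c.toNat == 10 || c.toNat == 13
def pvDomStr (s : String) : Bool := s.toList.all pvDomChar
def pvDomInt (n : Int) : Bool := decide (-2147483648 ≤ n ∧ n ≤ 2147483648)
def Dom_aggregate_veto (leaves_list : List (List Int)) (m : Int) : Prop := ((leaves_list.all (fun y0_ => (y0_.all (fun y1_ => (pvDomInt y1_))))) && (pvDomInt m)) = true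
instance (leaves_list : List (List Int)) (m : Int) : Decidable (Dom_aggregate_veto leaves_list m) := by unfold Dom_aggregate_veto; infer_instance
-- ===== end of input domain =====

-- B replaces A's single pass (key->position dict, in-place count increments) by two passes:
-- a frequency table first, then an ordered-dedup pass emitting precomputed counts (alternative decomposition, same cost).


-- ===== PORT A =====
-- str(leaves_i) for a list of ints: "[a, b, …]" with str(int) = PySem.Int.toStr (exact on lists of ints; used by both ports)
def pyStrIntList (l : List Int) : String :=
  "[" ++ String.intercalate ", " (l.map PySem.Int.toStr) ++ "]"

-- one pass; state = (dico_leaves, tab_leaves, count_leaves, i)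
def aggregate_veto (leaves_list : List (List Int)) (m : Int) : List (List Int) × List Int :=
  let st := leaves_list.foldl (fun st leaves_i =>
    let k := pyStrIntList leaves_i
    if st.1.contains k then
      -- count_leaves[dico_leaves[k]] += 1 (the key is present, so dico_leaves[k] never raises; getD 0 is exact here)
      (st.1, st.2.1,
        PySem.List.pySetD st.2.2.1 ((st.1.get? k).getD 0)
          (PySem.List.pyGetD st.2.2.1 ((st.1.get? k).getD 0) 0 + 1),
        st.2.2.2)
    else
      (st.1.insert k st.2.2.2, st.2.1 ++ [leaves_i], st.2.2.1 ++ [1], st.2.2.2 + 1))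
    ((PySem.Dict.empty : PySem.Dict String Int), ([] : List (List Int)), ([] : List Int), (0 : Int))
  (st.2.1, st.2.2.1)

-- ===== PORT B =====
-- pass 1: frequency table; pass 2: ordered dedup with a seen set, emitting counts[k]
def aggregate_veto_alt (leaves_list : List (List Int)) (m : Int) : List (List Int) × List Int :=
  let counts := leaves_list.foldl (fun d leaves_i =>
      let k := pyStrIntList leaves_i
      d.insert k (d.getD k 0 + 1)) (PySem.Dict.empty : PySem.Dict String Int)
  let fin := leaves_list.foldl (fun st leaves_i =>
      let k := pyStrIntList leaves_i
      if PySem.Set.contains st.1 k then st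
      else (PySem.Set.add st.1 k, st.2.1 ++ [leaves_i], st.2.2 ++ [counts.getD k 0]))
    ((PySem.Set.empty : PySem.Set String), ([] : List (List Int)), ([] : List Int))
  (fin.2.1, fin.2.2)

-- ===== PRECONDITION & SPEC =====
def Spec_aggregate_veto (leaves_list : List (List Int)) (m : Int) (out : List (List Int) × List Int) : Prop := out = aggregate_veto_alt leaves_list m
instance (leaves_list : List (List Int)) (m : Int) (out : List (List Int) × List Int) : Decidable (Spec_aggregate_veto leaves_list m out) := by unfold Spec_aggregate_veto; infer_instance

-- ===== CLAIM (what is proved, stated in full; the proofs are below) =====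
def Claim_equal_aggregate_veto : Prop := ∀ (leaves_list : List (List Int)) (m : Int), Dom_aggregate_veto leaves_list m → Spec_aggregate_veto leaves_list m (aggregate_veto leaves_list m)

-- ===== LEMMAS AND PROOFS =====

-- first-occurrence dedup of l by key pyStrIntList, skipping keys already in seen
def ddKey (seen : List String) : List (List Int) → List (List Int)
  | [] => []
  | x :: xs =>
    if pyStrIntList x ∈ seen then ddKey seen xs
    else x :: ddKey (seen ++ [pyStrIntList x]) xs

theorem mem_ddKey_not_seen {seen : List String} {l : List (List Int)} {t : List Int}
    (h : t ∈ ddKey seen l) : pyStrIntList t ∉ seen := by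
  induction l generalizing seen with
  | nil => simp [ddKey] at h
  | cons x xs ih =>
    by_cases hx : pyStrIntList x ∈ seen
    · exact ih (by simpa [ddKey, hx] using h)
    · simp only [ddKey, if_neg hx] at h
      rcases List.mem_cons.1 h with rfl | h
      · exact hx
      · intro hmem; exact (ih h) (List.mem_append_left _ hmem)

theorem idxOf?_append_singleton (ks : List String) (k k' : String) :
    List.idxOf? k' (ks ++ [k]) =
      if k' ∈ ks then List.idxOf? k' ks
      else if k' = k then some ks.length else none := by
  induction ks with
  | nil =>
    by_cases h : k' = k
    · subst h; simp [List.idxOf?, List.findIdx?_cons]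
    · have : (k == k') = false := by simp [Ne.symm h]
      simp [List.idxOf?, List.findIdx?_cons, this, h]
  | cons a t ih =>
    by_cases ha : k' = a
    · subst ha; simp [List.idxOf?, List.findIdx?_cons]
    · have hba : (a == k') = false := by simp [Ne.symm ha]
      simp only [List.cons_append, List.idxOf?, List.findIdx?_cons, hba, Bool.false_eq_true,
        if_false] at *
      simp only [List.mem_cons, ha, false_or]
      rw [ih]
      by_cases hm : k' ∈ t
      · simp [hm]
      · by_cases hk : k' = k
        · subst hk; simp [hm]
        · simp [hm, hk]

-- the per-element count B's map produces
def keyCnt (l : List (List Int)) (t : List Int) : Int :=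
  ((l.map pyStrIntList).count (pyStrIntList t) : Nat)

-- ---- B side ----
theorem foldB (counts : PySem.Dict String Int) :
    ∀ (l : List (List Int)) (seen : List String) (tab : List (List Int)) (cnt : List Int),
    ∃ s',
      l.foldl (fun st leaves_i =>
          let k := pyStrIntList leaves_i
          if PySem.Set.contains st.1 k then st
          else (PySem.Set.add st.1 k, st.2.1 ++ [leaves_i], st.2.2 ++ [counts.getD k 0]))
        (seen, tab, cnt)
      = (s', tab ++ ddKey seen l,
          cnt ++ (ddKey seen l).map (fun t => counts.getD (pyStrIntList t) 0)) := by
  intro l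
  induction l with
  | nil => intro seen tab cnt; exact ⟨seen, by simp [ddKey]⟩
  | cons x xs ih =>
    intro seen tab cnt
    by_cases hx : pyStrIntList x ∈ seen
    · have hc : PySem.Set.contains seen (pyStrIntList x) = true :=
        (PySem.Set.contains_iff _ _).2 hx
      simpa [List.foldl_cons, hc, ddKey, hx] using ih seen tab cnt
    · have hc : PySem.Set.contains seen (pyStrIntList x) = false := by
        by_contra h
        exact hx ((PySem.Set.contains_iff _ _).1 (by revert h; cases PySem.Set.contains seen (pyStrIntList x) <;> simp))
      have hadd : PySem.Set.add seen (pyStrIntList x) = seen ++ [pyStrIntList x] :=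
        PySem.Set.add_of_not_mem hx
      obtain ⟨s', hs'⟩ := ih (seen ++ [pyStrIntList x]) (tab ++ [x])
        (cnt ++ [counts.getD (pyStrIntList x) 0])
      refine ⟨s', ?_⟩
      simp only [List.foldl_cons, hc, Bool.false_eq_true, if_false, hadd]
      rw [hs']
      simp [ddKey, hx]


theorem zipWith_left_id (cnt : List Int) (tab : List (List Int)) (h : cnt.length = tab.length) :
    List.zipWith (fun c _ => c) cnt tab = cnt := by
  induction cnt generalizing tab with
  | nil => simp
  | cons a t ih => cases tab with
    | nil => simp at h
    | cons b tb => simpa using ih tb (by simpa using h)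

theorem keyCnt_cons (x t : List Int) (xs : List (List Int)) :
    keyCnt (x :: xs) t = keyCnt xs t + (if pyStrIntList x = pyStrIntList t then 1 else 0) := by
  unfold keyCnt
  rw [List.map_cons, List.count_cons]
  by_cases h : pyStrIntList x = pyStrIntList t
  · simp [h]
  · simp [h]

theorem keyCnt_cons_ne {x t : List Int} (xs : List (List Int))
    (h : pyStrIntList x ≠ pyStrIntList t) : keyCnt (x :: xs) t = keyCnt xs t := by
  simp [keyCnt_cons, h]

theorem zipWith_keyCnt_congr (x : List Int) (xs : List (List Int))
    (cnt : List Int) (tab : List (List Int))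
    (h : ∀ t ∈ tab, pyStrIntList x ≠ pyStrIntList t) :
    List.zipWith (fun c t => c + keyCnt (x :: xs) t) cnt tab
      = List.zipWith (fun c t => c + keyCnt xs t) cnt tab := by
  induction cnt generalizing tab with
  | nil => simp
  | cons a ct ih => cases tab with
    | nil => simp
    | cons b tb =>
      simp only [List.zipWith_cons_cons, List.cons.injEq]
      refine ⟨by rw [keyCnt_cons_ne xs (h b (by simp))], ih tb (fun t ht => h t (by simp [ht]))⟩

-- ---- A side ----
theorem foldA :
    ∀ (l : List (List Int)) (d : PySem.Dict String Int) (tab : List (List Int)) (cnt : List Int),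
    cnt.length = tab.length →
    (tab.map pyStrIntList).Nodup →
    (∀ k, d.get? k = (List.idxOf? k (tab.map pyStrIntList)).map (fun n => (n : Int))) →
    ∃ d',
      l.foldl (fun st leaves_i =>
          let k := pyStrIntList leaves_i
          if st.1.contains k then
            (st.1, st.2.1,
              PySem.List.pySetD st.2.2.1 ((st.1.get? k).getD 0)
                (PySem.List.pyGetD st.2.2.1 ((st.1.get? k).getD 0) 0 + 1),
              st.2.2.2)
          else
            (st.1.insert k st.2.2.2, st.2.1 ++ [leaves_i], st.2.2.1 ++ [1], st.2.2.2 + 1))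
        (d, tab, cnt, (tab.length : Int))
      = (d', tab ++ ddKey (tab.map pyStrIntList) l,
          (List.zipWith (fun c t => c + keyCnt l t) cnt tab)
            ++ (ddKey (tab.map pyStrIntList) l).map (keyCnt l),
          ((tab ++ ddKey (tab.map pyStrIntList) l).length : Int)) := by
  intro l
  induction l with
  | nil =>
    intro d tab cnt hlen hnd hget
    refine ⟨d, ?_⟩
    have hz : List.zipWith (fun c t => c + keyCnt [] t) cnt tab = cnt := by
      simp only [keyCnt, List.map_nil, List.count_nil, Nat.cast_zero, add_zero]
      exact zipWith_left_id cnt tab hlen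
    simp [ddKey, hz]
  | cons x xs ih =>
    intro d tab cnt hlen hnd hget
    by_cases hx : pyStrIntList x ∈ tab.map pyStrIntList
    · -- repeated key: A bumps count_leaves at the stored index
      obtain ⟨j, hj⟩ := Option.isSome_iff_exists.1 (List.isSome_idxOf?.2 hx)
      obtain ⟨hjlt, hkj, -⟩ := List.idxOf?_eq_some_iff.1 hj
      have hjc : j < cnt.length := by
        rw [hlen]; simpa using hjlt
      have hgetk : d.get? (pyStrIntList x) = some (j : Int) := by rw [hget, hj]; rfl
      have hcont : d.contains (pyStrIntList x) = true := by
        rw [PySem.Dict.contains_eq_isSome_get?, hgetk]; rfl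
      have hset : PySem.List.pySetD cnt ((d.get? (pyStrIntList x)).getD 0)
            (PySem.List.pyGetD cnt ((d.get? (pyStrIntList x)).getD 0) 0 + 1)
          = cnt.set j (cnt[j] + 1) := by
        rw [hgetk]
        simp only [Option.getD_some, PySem.List.pySetD_natCast, PySem.List.pyGetD_natCast]
        rw [List.getD_eq_getElem cnt 0 hjc]
      obtain ⟨d', hd'⟩ := ih d tab (cnt.set j (cnt[j] + 1))
        (by simpa using hlen) hnd hget
      refine ⟨d', ?_⟩
      rw [List.foldl_cons]
      simp only [hcont, if_true]
      rw [hset, hd']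
      have hdd : ddKey (tab.map pyStrIntList) (x :: xs) = ddKey (tab.map pyStrIntList) xs := by
        rw [ddKey, if_pos hx]
      have hmap : (ddKey (tab.map pyStrIntList) xs).map (keyCnt xs)
          = (ddKey (tab.map pyStrIntList) xs).map (keyCnt (x :: xs)) := by
        refine List.map_congr_left fun t ht => ?_
        have hne : pyStrIntList x ≠ pyStrIntList t := by
          intro he
          exact mem_ddKey_not_seen ht (he ▸ hx)
        exact (keyCnt_cons_ne xs hne).symm
      have hzip : List.zipWith (fun c t => c + keyCnt xs t) (cnt.set j (cnt[j] + 1)) tab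
          = List.zipWith (fun c t => c + keyCnt (x :: xs) t) cnt tab := by
        apply List.ext_getElem
        · simp
        · intro p hp1 hp2
          have hpc : p < cnt.length := by simp at hp1; omega
          have hpt : p < tab.length := by rw [← hlen]; exact hpc
          simp only [List.getElem_zipWith, List.getElem_set]
          have hiff : j = p ↔ pyStrIntList x = pyStrIntList tab[p] := by
            constructor
            · rintro rfl
              have := hkj
              simpa using this.symm
            · intro he
              have h1 : (tab.map pyStrIntList)[j] = (tab.map pyStrIntList)[p]'(by simpa using hpt) := by
                rw [hkj]; simpa using he
              exact hnd.getElem_inj_iff.1 h1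
          rw [keyCnt_cons]
          by_cases hjp : j = p
          · rw [if_pos hjp, if_pos (hiff.1 hjp)]
            subst hjp; ring
          · rw [if_neg hjp, if_neg (fun he => hjp (hiff.2 he))]
            ring
      rw [hdd, hmap, hzip]
    · -- new key: A appends and records the index
      have hnone : d.get? (pyStrIntList x) = none := by
        rw [hget, List.idxOf?_eq_none_iff.2 hx]; rfl
      have hcont : d.contains (pyStrIntList x) = false := by
        rw [PySem.Dict.contains_eq_isSome_get?, hnone]; rfl
      have hks : (tab ++ [x]).map pyStrIntList = tab.map pyStrIntList ++ [pyStrIntList x] := by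
        simp
      obtain ⟨d', hd'⟩ := ih (d.insert (pyStrIntList x) (tab.length : Int)) (tab ++ [x]) (cnt ++ [1])
        (by simp [hlen])
        (by rw [hks]; simpa [List.nodup_append] using ⟨hnd, fun t ht he => hx (he ▸ List.mem_map_of_mem ht)⟩)
        (by
          intro k'
          rw [hks]
          by_cases hk' : k' = pyStrIntList x
          · subst hk'
            rw [PySem.Dict.get?_insert, if_pos rfl,
              idxOf?_append_singleton, if_neg hx, if_pos rfl]
            simp
          · rw [PySem.Dict.get?_insert, if_neg hk', hget, idxOf?_append_singleton]
            by_cases hm : k' ∈ tab.map pyStrIntList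
            · rw [if_pos hm]
            · rw [if_neg hm, if_neg hk', List.idxOf?_eq_none_iff.2 hm])
      refine ⟨d', ?_⟩
      rw [List.foldl_cons]
      simp only [hcont, Bool.false_eq_true, if_false]
      have hlen1 : (tab.length : Int) + 1 = (((tab ++ [x]).length : Nat) : Int) := by
        simp
      rw [hlen1, hd', hks]
      have hdd : ddKey (tab.map pyStrIntList) (x :: xs)
          = x :: ddKey (tab.map pyStrIntList ++ [pyStrIntList x]) xs := by
        rw [ddKey, if_neg hx]
      have hnotx : ∀ t ∈ tab, pyStrIntList x ≠ pyStrIntList t := by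
        intro t ht he
        exact hx (he ▸ List.mem_map_of_mem ht)
      have hzipsplit : List.zipWith (fun c t => c + keyCnt xs t) (cnt ++ [1]) (tab ++ [x])
          = List.zipWith (fun c t => c + keyCnt xs t) cnt tab ++ [1 + keyCnt xs x] := by
        rw [List.zipWith_append hlen]
        simp
      have hmap : (ddKey (tab.map pyStrIntList ++ [pyStrIntList x]) xs).map (keyCnt xs)
          = (ddKey (tab.map pyStrIntList ++ [pyStrIntList x]) xs).map (keyCnt (x :: xs)) := by
        refine List.map_congr_left fun t ht => ?_
        have hne : pyStrIntList x ≠ pyStrIntList t := by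
          intro he
          exact mem_ddKey_not_seen ht (by rw [← he]; simp)
        exact (keyCnt_cons_ne xs hne).symm
      have hheadcnt : keyCnt (x :: xs) x = 1 + keyCnt xs x := by
        rw [keyCnt_cons, if_pos rfl]; ring
      rw [hdd]
      simp only [List.map_cons]
      rw [hzipsplit, hmap, hheadcnt, zipWith_keyCnt_congr x xs cnt tab hnotx]
      simp

theorem counts_eq_counter (l : List (List Int)) :
    l.foldl (fun d leaves_i =>
        let k := pyStrIntList leaves_i
        d.insert k (d.getD k 0 + 1)) (PySem.Dict.empty : PySem.Dict String Int)
      = PySem.Dict.counter (l.map pyStrIntList) := by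
  rw [← PySem.Dict.foldl_insert_getD_add_one_eq_counter, List.foldl_map]

theorem aggregate_veto_spec : Claim_equal_aggregate_veto := by
  intro l m _
  unfold Spec_aggregate_veto aggregate_veto aggregate_veto_alt
  obtain ⟨d', hA⟩ := foldA l PySem.Dict.empty [] [] rfl (by simp)
    (by intro k; simp [List.idxOf?])
  simp only [List.length_nil, Nat.cast_zero, List.nil_append, List.map_nil,
    List.zipWith_nil_right] at hA
  obtain ⟨s', hB⟩ := foldB (PySem.Dict.counter (l.map pyStrIntList)) l
    PySem.Set.empty [] []
  rw [counts_eq_counter]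
  rw [hA]
  simp only [hB]
  simp only [List.nil_append]
  refine Prod.ext rfl ?_
  refine List.map_congr_left fun t _ => ?_
  rw [PySem.Dict.getD_counter]
  rfl
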